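-- pv_equiv track=rewrite | github.com/erythropygia/Python-Projects | Python Ödev 3/soru1modul.py | enkucuk
-- ===== SOURCE A (Python) =====
-- def enkucuk(liste):
--      temp=0
--      for i in range(len(liste)):
--         for j in range(len(liste)):
--             if(liste[i]<liste[j]):
--                 temp=liste[i]
--                 liste[i]=liste[j]
--                 liste[j]=temp
--      return liste[0]
-- ===== SOURCE B (Python) =====
-- def enkucuk(liste):
--     liste.sort()
--     return liste[0]
-- ===== Notes on version B (the rewrite author's own statement) =====
-- stated objective: simpler
-- what changed: Replaced the O(n^2) nested compare-and-swap sort (which sorts the list ascending in place and returns its first element) by the library in-place sort followed by returning the first element; same return value and same in-place mutation.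
import Mathlib
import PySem

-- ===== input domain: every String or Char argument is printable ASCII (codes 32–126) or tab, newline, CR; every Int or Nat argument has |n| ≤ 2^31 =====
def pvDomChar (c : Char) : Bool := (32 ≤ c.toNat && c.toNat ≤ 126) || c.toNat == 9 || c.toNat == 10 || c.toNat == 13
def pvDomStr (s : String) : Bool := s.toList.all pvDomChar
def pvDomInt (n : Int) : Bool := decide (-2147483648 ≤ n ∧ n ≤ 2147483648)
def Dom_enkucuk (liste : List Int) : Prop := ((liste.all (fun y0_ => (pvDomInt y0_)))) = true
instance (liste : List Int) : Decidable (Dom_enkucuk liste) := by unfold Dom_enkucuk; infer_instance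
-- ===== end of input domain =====

-- B replaces A's O(n^2) nested compare-and-swap sort by the library in-place sort plus
-- returning the first element; both Pythons sort `liste` ascending in place (same mutation)
-- and return its minimum; the equivalence proved here is about the return value.

-- ===== PORT A =====
-- literal transliteration of A's nested loops; liste[i]/liste[j] reads via pyGetD and the
-- two assignments via pySetD (indices come from range(len(liste)), always in range)
def enkucuk (liste : List Int) : Int :=
  let final :=
    (PySem.List.pyRange 0 (liste.length : Int) 1).foldl (fun l i =>
      (PySem.List.pyRange 0 (l.length : Int) 1).foldl (fun l' j =>
        if PySem.List.pyGetD l' i 0 < PySem.List.pyGetD l' j 0 then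
          let temp := PySem.List.pyGetD l' i 0
          let l'' := PySem.List.pySetD l' i (PySem.List.pyGetD l' j 0)
          PySem.List.pySetD l'' j temp
        else l') l) liste
  PySem.List.pyGetD final 0 0

-- ===== PORT B =====
-- liste.sort(); return liste[0]
def enkucuk_alt (liste : List Int) : Int :=
  let s := PySem.List.sorted liste (fun x => x) false
  PySem.List.pyGetD s 0 0

-- ===== PRECONDITION & SPEC =====
-- Pre_ excludes only the empty list, on which both Pythons raise IndexError when taking the first element.
def Pre_enkucuk (liste : List Int) : Prop := liste ≠ []
instance (liste : List Int) : Decidable (Pre_enkucuk liste) := by unfold Pre_enkucuk; infer_instance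
def pvWitness_enkucuk : List Int := ([3, 1, 2])
def Spec_enkucuk (liste : List Int) (out : Int) : Prop := out = enkucuk_alt liste
instance (liste : List Int) (out : Int) : Decidable (Spec_enkucuk liste out) := by unfold Spec_enkucuk; infer_instance

-- ===== CLAIM (what is proved, stated in full; the proofs are below) =====
def Claim_equal_enkucuk : Prop := ∀ (liste : List Int), Dom_enkucuk liste → Pre_enkucuk liste → Spec_enkucuk liste (enkucuk liste)

-- ===== LEMMAS AND PROOFS =====

-- clean Nat-indexed version of A's loops, proved equal to the port below
def swapStep (i : Nat) (l : List Int) (j : Nat) : List Int :=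
  if l.getD i 0 < l.getD j 0 then (l.set i (l.getD j 0)).set j (l.getD i 0) else l

def innerN (l : List Int) (i : Nat) : List Int := (List.range l.length).foldl (swapStep i) l

def outerN (l : List Int) : List Int := (List.range l.length).foldl innerN l

-- ordered insertion with A's strict comparison
def insv (v : Int) : List Int → List Int
  | [] => [v]
  | x :: s => if v < x then v :: x :: s else x :: insv v s

theorem insv_ne_nil (v : Int) (s : List Int) : insv v s ≠ [] := by
  cases s with
  | nil => simp [insv]
  | cons x s => simp only [insv]; split <;> simp

theorem insv_perm (v : Int) (s : List Int) : (insv v s).Perm (v :: s) := by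
  induction s with
  | nil => simp [insv]
  | cons x s ih =>
    simp only [insv]; split
    · exact List.Perm.refl _
    · exact ((ih.cons x).trans (List.Perm.swap v x s))

theorem insv_length (v : Int) (s : List Int) : (insv v s).length = s.length + 1 :=
  (insv_perm v s).length_eq

theorem insv_sorted (v : Int) (s : List Int) (h : s.Pairwise (· ≤ ·)) :
    (insv v s).Pairwise (· ≤ ·) := by
  induction s with
  | nil => simp [insv]
  | cons x s ih =>
    rcases List.pairwise_cons.mp h with ⟨hx, hs⟩
    simp only [insv]
    by_cases hv : v < x
    · rw [if_pos hv]
      refine List.pairwise_cons.mpr ⟨?_, h⟩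
      intro y hy
      rcases List.mem_cons.mp hy with rfl | hy
      · omega
      · exact le_of_lt (lt_of_lt_of_le hv (hx y hy))
    · rw [if_neg hv]
      refine List.pairwise_cons.mpr ⟨?_, ih hs⟩
      intro y hy
      rcases List.mem_cons.mp ((insv_perm v s).mem_iff.mp hy) with rfl | hy
      · omega
      · exact hx y hy

theorem insv_of_le (v : Int) (s : List Int) (h : ∀ y ∈ s, v ≤ y) : insv v s = v :: s := by
  induction s with
  | nil => rfl
  | cons x s ih =>
    simp only [insv]
    by_cases hv : v < x
    · simp [hv]
    · have hx : v = x := le_antisymm (h x (by simp)) (by omega)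
      subst hx
      simp only [if_neg hv]
      rw [ih (fun y hy => h y (by simp [hy]))]

theorem getLastD_cons_cons (x a d : Int) (b : List Int) :
    (x :: a :: b).getLastD d = (a :: b).getLastD d := by
  simp [List.getLastD_eq_getLast?, List.getLast?_cons_cons]

theorem insv_getLastD_ge (v : Int) (s : List Int) (hs : s ≠ []) :
    s.getLastD 0 ≤ (insv v s).getLastD 0 := by
  induction s with
  | nil => simp at hs
  | cons x s ih =>
    simp only [insv]
    cases s with
    | nil =>
      by_cases hv : v < x
      · simp [hv, insv]
      · simp [hv, insv]
        omega
    | cons y s' =>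
      by_cases hv : v < x
      · rw [if_pos hv]
        conv_rhs => rw [getLastD_cons_cons]
      · rw [if_neg hv]
        have h' := ih (by simp)
        have hform : insv v (y :: s') ≠ [] := insv_ne_nil v (y :: s')
        cases hins : insv v (y :: s') with
        | nil => exact absurd hins hform
        | cons a b =>
          rw [hins] at h'
          calc (x :: y :: s').getLastD 0 = (y :: s').getLastD 0 := getLastD_cons_cons x y 0 s'
            _ ≤ (a :: b).getLastD 0 := h'
            _ = (x :: a :: b).getLastD 0 := (getLastD_cons_cons x a 0 b).symm

theorem dropLast_append_getLastD (l : List Int) (h : l ≠ []) :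
    l.dropLast ++ [l.getLastD 0] = l := by
  induction l with
  | nil => exact absurd rfl h
  | cons x l ih =>
    cases l with
    | nil => rfl
    | cons a b =>
      rw [getLastD_cons_cons, List.dropLast_cons_of_ne_nil (by simp)]
      simpa using ih (by simp)

-- getD / set on an explicit split
theorem getD_append_len (c r : List Int) (x d : Int) : (c ++ x :: r).getD c.length d = x := by
  induction c with
  | nil => rfl
  | cons a c ih => simpa using ih

theorem getD_append_add (c r : List Int) (k : Nat) (d : Int) :
    (c ++ r).getD (c.length + k) d = r.getD k d := by
  induction c with
  | nil => simp
  | cons a c ih => simpa [Nat.succ_add] using ih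

theorem set_append_len (c r : List Int) (x y : Int) : (c ++ x :: r).set c.length y = c ++ y :: r := by
  induction c with
  | nil => rfl
  | cons a c ih => simpa using ih

-- splitting List.range at a point
theorem range_split3 (a b : Nat) :
    List.range (a + 1 + b) = List.range' 0 a ++ (List.range' a 1 ++ List.range' (a + 1) b) := by
  have h2 : List.range' a 1 ++ List.range' (a + 1) b = List.range' a (1 + b) :=
    List.range'_append_1
  have h1 : List.range' 0 a ++ List.range' (0 + a) (1 + b) = List.range' 0 (a + (1 + b)) :=
    List.range'_append_1
  rw [List.range_eq_range', show a + 1 + b = a + (1 + b) by omega, ← h1, Nat.zero_add, h2]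

-- a fold of identity steps
theorem foldl_id_of_mem {α : Type} (f : List Int → α → List Int) (l : List Int) (J : List α)
    (h : ∀ j ∈ J, f l j = l) : J.foldl f l = l := by
  induction J with
  | nil => rfl
  | cons j J ih =>
    simp only [List.foldl_cons, h j (by simp)]
    exact ih (fun j' hj' => h j' (by simp [hj']))

-- Phase for i = 0 (the max sweep): position 0 accumulates the running maximum
theorem sweep (t : List Int) : ∀ (u : List Int) (m : Int), (∀ x ∈ u, x ≤ m) →
    ∃ M w, (List.range' (u.length + 1) t.length).foldl (swapStep 0) (m :: u ++ t) = M :: w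
      ∧ (M :: w).Perm (m :: u ++ t) ∧ (∀ x ∈ M :: w, x ≤ M) := by
  induction t with
  | nil =>
    intro u m hu
    refine ⟨m, u, by simp, by simp, ?_⟩
    intro x hx
    rcases List.mem_cons.mp hx with rfl | hx
    · omega
    · exact hu x (by simpa using hx)
  | cons x t ih =>
    intro u m hu
    rw [List.length_cons, List.range'_succ, List.foldl_cons]
    have hget0 : (m :: u ++ x :: t).getD 0 0 = m := rfl
    have hgetj : (m :: u ++ x :: t).getD (u.length + 1) 0 = x := by
      have := getD_append_len (m :: u) t x 0
      simpa using this
    by_cases hc : m < x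
    · have hstep : swapStep 0 (m :: u ++ x :: t) (u.length + 1) = x :: u ++ m :: t := by
        unfold swapStep
        rw [hget0, hgetj, if_pos hc]
        have hs0 : (m :: u ++ x :: t).set 0 x = x :: u ++ x :: t := rfl
        rw [hs0]
        have := set_append_len (x :: u) t x m
        simpa using this
      rw [hstep]
      have hrest : x :: u ++ m :: t = x :: (u ++ [m]) ++ t := by simp
      have hlen : u.length + 1 + 1 = (u ++ [m]).length + 1 := by simp
      rw [hrest, hlen]
      obtain ⟨M, w, heq, hperm, hle⟩ := ih (u ++ [m]) x
        (by intro y hy; rcases List.mem_append.mp hy with hy | hy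
            · exact le_of_lt (lt_of_le_of_lt (hu y hy) hc)
            · simp at hy; omega)
      refine ⟨M, w, heq, hperm.trans ?_, hle⟩
      have h1 : x :: (u ++ [m]) ++ t = x :: (u ++ m :: t) := by simp
      have h2 : m :: u ++ x :: t = m :: (u ++ x :: t) := rfl
      rw [h1, h2]
      exact ((List.Perm.cons x List.perm_middle).trans
        (List.Perm.swap m x (u ++ t))).trans (List.Perm.cons m List.perm_middle.symm)
    · have hstep : swapStep 0 (m :: u ++ x :: t) (u.length + 1) = m :: u ++ x :: t := by
        unfold swapStep
        rw [hget0, hgetj, if_neg hc]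
      rw [hstep]
      have hrest : m :: u ++ x :: t = m :: (u ++ [x]) ++ t := by simp
      have hlen : u.length + 1 + 1 = (u ++ [x]).length + 1 := by simp
      rw [hrest, hlen]
      obtain ⟨M, w, heq, hperm, hle⟩ := ih (u ++ [x]) m
        (by intro y hy; rcases List.mem_append.mp hy with hy | hy
            · exact hu y hy
            · simp at hy; omega)
      exact ⟨M, w, heq, hperm.trans (List.Perm.of_eq (by simp)), hle⟩

-- Phase 1 for i ≥ 1: inserting v into the sorted prefix s
theorem phase1 (s : List Int) : ∀ (c : List Int) (v : Int) (t : List Int),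
    s.Pairwise (· ≤ ·) →
    (List.range' c.length s.length).foldl (swapStep (c.length + s.length)) (c ++ s ++ v :: t)
      = c ++ (insv v s).dropLast ++ (insv v s).getLastD 0 :: t := by
  induction s with
  | nil =>
    intro c v t _
    simp [insv]
  | cons x s ih =>
    intro c v t hsort
    rw [List.length_cons, List.range'_succ, List.foldl_cons]
    rcases List.pairwise_cons.mp hsort with ⟨hx, hs⟩
    have hgetj : (c ++ (x :: s) ++ v :: t).getD c.length 0 = x := by
      have := getD_append_len c (s ++ v :: t) x 0
      simpa using this
    have hgeti : (c ++ (x :: s) ++ v :: t).getD (c.length + (s.length + 1)) 0 = v := by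
      have h1 : c ++ (x :: s) ++ v :: t = (c ++ x :: s) ++ v :: t := by simp
      have h2 := getD_append_len (c ++ x :: s) t v 0
      rw [h1]
      simpa [Nat.add_assoc, Nat.add_comm, Nat.add_left_comm] using h2
    by_cases hc : v < x
    · have hstep : swapStep (c.length + (s.length + 1)) (c ++ (x :: s) ++ v :: t) c.length
          = (c ++ [v]) ++ s ++ x :: t := by
        unfold swapStep
        rw [hgeti, hgetj, if_pos hc]
        have hs1 : (c ++ (x :: s) ++ v :: t).set (c.length + (s.length + 1)) x
            = (c ++ x :: s) ++ x :: t := by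
          have h1 : c ++ (x :: s) ++ v :: t = (c ++ x :: s) ++ v :: t := by simp
          have h2 := set_append_len (c ++ x :: s) t v x
          rw [h1]
          simpa [Nat.add_assoc, Nat.add_comm, Nat.add_left_comm] using h2
        rw [hs1]
        have h3 : (c ++ x :: s) ++ x :: t = c ++ x :: (s ++ x :: t) := by simp
        rw [h3, set_append_len c (s ++ x :: t) x v]
        simp
      rw [hstep]
      have hlen1 : c.length + 1 = (c ++ [v]).length := by simp
      have hlen2 : c.length + (s.length + 1) = (c ++ [v]).length + s.length := by simp; omega
      rw [hlen1, hlen2]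
      have hallx : ∀ y ∈ s, x ≤ y := hx
      rw [ih (c ++ [v]) x t hs, insv_of_le x s hallx]
      have hne : x :: s ≠ ([] : List Int) := by simp
      have hform : insv v (x :: s) = v :: x :: s := by simp [insv, hc]
      rw [hform]
      simp [List.dropLast_cons_of_ne_nil hne]
    · have hstep : swapStep (c.length + (s.length + 1)) (c ++ (x :: s) ++ v :: t) c.length
          = (c ++ [x]) ++ s ++ v :: t := by
        unfold swapStep
        rw [hgeti, hgetj, if_neg hc]
        simp
      rw [hstep]
      have hlen1 : c.length + 1 = (c ++ [x]).length := by simp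
      have hlen2 : c.length + (s.length + 1) = (c ++ [x]).length + s.length := by simp; omega
      rw [hlen1, hlen2]
      rw [ih (c ++ [x]) v t hs]
      have hform : insv v (x :: s) = x :: insv v s := by simp [insv, hc]
      have hne := insv_ne_nil v s
      rw [hform]
      cases hi : insv v s with
      | nil => exact absurd hi hne
      | cons a b =>
        simp [List.dropLast_cons_of_ne_nil (l := a :: b) (by simp)]

-- Phase 3: once the maximum sits at position i, the remaining j's do nothing
theorem phase3 (c : List Int) (M : Int) (t : List Int) (ht : ∀ x ∈ t, x ≤ M) :
    (List.range' (c.length + 1) t.length).foldl (swapStep c.length) (c ++ M :: t)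
      = c ++ M :: t := by
  apply foldl_id_of_mem
  intro j hj
  rw [List.mem_range'_1] at hj
  obtain ⟨h1, h2⟩ := hj
  obtain ⟨k, rfl⟩ : ∃ k, j = c.length + 1 + k := ⟨j - (c.length + 1), by omega⟩
  have hk : k < t.length := by omega
  unfold swapStep
  have hgi : (c ++ M :: t).getD c.length 0 = M := getD_append_len c t M 0
  have hgj : (c ++ M :: t).getD (c.length + 1 + k) 0 = t.getD k 0 := by
    have h1 : c ++ M :: t = (c ++ [M]) ++ t := by simp
    have h2 := getD_append_add (c ++ [M]) t k 0
    rw [h1]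
    simpa [Nat.add_assoc] using h2
  rw [hgi, hgj, if_neg]
  have hmem : t.getD k 0 ∈ t := by
    rw [List.getD_eq_getElem _ _ hk]
    exact List.getElem_mem hk
  have := ht _ hmem
  omega

-- characterization of one inner pass at index i = s.length, with sorted max-ended prefix s
theorem inner_step (s : List Int) (v : Int) (t : List Int) (hs : s.Pairwise (· ≤ ·))
    (hmax : ∀ x ∈ s ++ v :: t, x ≤ s.getLastD 0) (hne : s ≠ []) :
    innerN (s ++ v :: t) s.length
      = insv v s ++ t := by
  unfold innerN
  have hlen : (s ++ v :: t).length = s.length + 1 + t.length := by simp; omega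
  rw [hlen]
  rw [range_split3, List.foldl_append, List.foldl_append]
  have hp1 : (List.range' 0 s.length).foldl (swapStep s.length) (s ++ v :: t)
      = (insv v s).dropLast ++ (insv v s).getLastD 0 :: t := by
    have := phase1 s [] v t hs
    simpa using this
  rw [hp1]
  have hM : ∀ x ∈ insv v s ++ t, x ≤ (insv v s).getLastD 0 := by
    have hL := insv_getLastD_ge v s hne
    intro x hx
    rcases List.mem_append.mp hx with hx | hx
    · rcases List.mem_cons.mp ((insv_perm v s).mem_iff.mp hx) with rfl | hx
      · exact le_trans (hmax x (by simp)) hL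
      · exact le_trans (hmax x (by simp [hx])) hL
    · exact le_trans (hmax x (by simp [hx])) hL
  have hclen : ((insv v s).dropLast).length = s.length := by
    have := insv_length v s
    simp [List.length_dropLast, this]
  have hgi := getD_append_len ((insv v s).dropLast) t ((insv v s).getLastD 0) 0
  rw [hclen] at hgi
  have hp2 : (List.range' s.length 1).foldl (swapStep s.length)
      ((insv v s).dropLast ++ (insv v s).getLastD 0 :: t)
      = (insv v s).dropLast ++ (insv v s).getLastD 0 :: t := by
    simp only [List.range'_one, List.foldl_cons, List.foldl_nil]
    unfold swapStep
    rw [hgi, if_neg (lt_irrefl _)]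
  rw [hp2]
  have hp3 : (List.range' (s.length + 1) t.length).foldl (swapStep s.length)
      ((insv v s).dropLast ++ (insv v s).getLastD 0 :: t)
      = (insv v s).dropLast ++ (insv v s).getLastD 0 :: t := by
    have := phase3 ((insv v s).dropLast) ((insv v s).getLastD 0) t
      (fun x hx => hM x (by simp [hx]))
    rw [hclen] at this
    exact this
  rw [hp3]
  calc (insv v s).dropLast ++ (insv v s).getLastD 0 :: t
      = ((insv v s).dropLast ++ [(insv v s).getLastD 0]) ++ t := by simp
    _ = insv v s ++ t := by rw [dropLast_append_getLastD _ (insv_ne_nil v s)]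

-- the outer loop invariant
theorem outer_inv (l : List Int) : ∀ k, 1 ≤ k → k ≤ l.length →
    ∃ s t, (List.range k).foldl innerN l = s ++ t ∧ s.length = k ∧ s.Pairwise (· ≤ ·)
      ∧ (s ++ t).Perm l ∧ (∀ x ∈ s ++ t, x ≤ s.getLastD 0) := by
  intro k
  induction k with
  | zero => omega
  | succ k ih =>
    intro _ hk
    by_cases hk1 : k = 0
    · subst hk1
      -- first iteration: the max sweep
      cases l with
      | nil => simp at hk
      | cons m t =>
        simp only [Nat.zero_add, List.range_one, List.foldl_cons, List.foldl_nil]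
        unfold innerN
        have hlen : (m :: t).length = t.length + 1 := by simp
        rw [hlen]
        have hsplit : List.range (t.length + 1)
            = List.range' 0 1 ++ List.range' 1 t.length := by
          rw [show t.length + 1 = 0 + 1 + t.length by omega]
          simpa using range_split3 0 t.length
        rw [hsplit, List.foldl_append]
        have h0 : (List.range' 0 1).foldl (swapStep 0) (m :: t) = m :: t := by
          simp only [List.range'_one, List.foldl_cons, List.foldl_nil]
          unfold swapStep
          rw [if_neg (lt_irrefl _)]
        rw [h0]
        obtain ⟨M, w, heq, hperm, hle⟩ := sweep t [] m (by simp)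
        simp only [List.length_nil, Nat.zero_add] at heq hperm
        refine ⟨[M], w, by simpa using heq, rfl, by simp, by simpa using hperm, ?_⟩
        simpa using hle
    · obtain ⟨s, t, heq, hslen, hsort, hperm, hmax⟩ := ih (by omega) (by omega)
      have hsne : s ≠ [] := by intro h; subst h; simp at hslen; omega
      have hlent : (s ++ t).length = l.length := hperm.length_eq
      have htne : t ≠ [] := by
        intro h; subst h; simp at hlent; omega
      cases t with
      | nil => exact absurd rfl htne
      | cons v t' =>
        rw [List.range_succ, List.foldl_append, List.foldl_cons, List.foldl_nil, heq]
        rw [← hslen] at *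
        rw [inner_step s v t' hsort hmax hsne]
        refine ⟨insv v s, t', rfl, by rw [insv_length],
          insv_sorted v s hsort, ?_, ?_⟩
        · have h1 : ((v :: s) ++ t') = v :: (s ++ t') := rfl
          refine ((insv_perm v s).append_right t').trans ?_
          rw [h1]
          exact (List.perm_middle.symm).trans hperm
        · have hL := insv_getLastD_ge v s hsne
          intro x hx
          rcases List.mem_append.mp hx with hx | hx
          · rcases List.mem_cons.mp ((insv_perm v s).mem_iff.mp hx) with rfl | hx
            · exact le_trans (hmax x (by simp)) hL
            · exact le_trans (hmax x (by simp [hx])) hL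
          · exact le_trans (hmax x (by simp [hx])) hL

-- the outer loop sorts: outerN l is the sorted permutation of l
theorem outerN_sorted (l : List Int) (hl : l ≠ []) :
    (outerN l).Pairwise (· ≤ ·) ∧ (outerN l).Perm l := by
  have hn : 1 ≤ l.length := by
    cases l with
    | nil => exact absurd rfl hl
    | cons a b => simp
  obtain ⟨s, t, heq, hslen, hsort, hperm, _⟩ := outer_inv l l.length hn le_rfl
  have hlent : (s ++ t).length = l.length := hperm.length_eq
  have htnil : t = [] := by
    have : s.length + t.length = l.length := by simpa using hlent
    rw [hslen] at this
    exact List.eq_nil_of_length_eq_zero (by omega)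
  subst htnil
  rw [List.append_nil] at heq hperm
  unfold outerN
  rw [heq]
  exact ⟨hsort, hperm⟩

theorem foldl_congr_fn {α β : Type} (f g : β → α → β) (J : List α)
    (h : ∀ acc, ∀ j ∈ J, f acc j = g acc j) : ∀ init, J.foldl f init = J.foldl g init := by
  induction J with
  | nil => intro init; rfl
  | cons j J ih =>
    intro init
    simp only [List.foldl_cons, h init j (by simp)]
    exact ih (fun acc j' hj' => h acc j' (by simp [hj'])) _

-- bridge: the port equals the Nat-indexed version
theorem inner_port_eq (l : List Int) (i : Nat) :
    (PySem.List.pyRange 0 (l.length : Int) 1).foldl (fun l' j =>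
        if PySem.List.pyGetD l' (i : Int) 0 < PySem.List.pyGetD l' j 0 then
          let temp := PySem.List.pyGetD l' (i : Int) 0
          let l'' := PySem.List.pySetD l' (i : Int) (PySem.List.pyGetD l' j 0)
          PySem.List.pySetD l'' j temp
        else l') l
      = innerN l i := by
  unfold innerN
  rw [PySem.List.pyRange_one]
  simp only [Int.sub_zero, Int.toNat_natCast]
  rw [List.foldl_map]
  apply foldl_congr_fn
  intro acc j _
  simp only [Int.zero_add, PySem.List.pyGetD_natCast, PySem.List.pySetD_natCast]
  rfl

theorem port_eq (l : List Int) : enkucuk l = (outerN l).getD 0 0 := by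
  unfold enkucuk outerN
  have houter :
      (PySem.List.pyRange 0 (l.length : Int) 1).foldl (fun acc i =>
        (PySem.List.pyRange 0 (acc.length : Int) 1).foldl (fun l' j =>
          if PySem.List.pyGetD l' i 0 < PySem.List.pyGetD l' j 0 then
            let temp := PySem.List.pyGetD l' i 0
            let l'' := PySem.List.pySetD l' i (PySem.List.pyGetD l' j 0)
            PySem.List.pySetD l'' j temp
          else l') acc) l
      = (List.range l.length).foldl innerN l := by
    rw [PySem.List.pyRange_one]
    simp only [Int.sub_zero, Int.toNat_natCast]
    rw [List.foldl_map]
    apply foldl_congr_fn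
    intro acc i _
    simp only [Int.zero_add]
    exact inner_port_eq acc i
  simp only [houter]
  rw [PySem.List.pyGetD_zero]

theorem alt_eq (l : List Int) : enkucuk_alt l = (PySem.List.sorted l (fun x => x) false).getD 0 0 := by
  simp [enkucuk_alt, PySem.List.pyGetD_zero]

-- ===== VERDICT (by name: the statement is the Claim_ definition above) =====
theorem enkucuk_spec : Claim_equal_enkucuk := by
  intro liste _ hpre
  unfold Spec_enkucuk
  rw [port_eq, alt_eq]
  obtain ⟨hsort, hperm⟩ := outerN_sorted liste hpre
  have h := PySem.List.sorted_id_eq_of_perm_of_pairwise liste (outerN liste) hperm hsort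
  exact (congrArg (fun xs => xs.getD 0 0) h).symm
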